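-- pv_equiv track=rewrite | github.com/DaYe03/custom_qr | qr_code/generate_qr.py | get_line_penalty
-- ===== SOURCE A (Python) =====
-- def get_line_penalty(line):
--     count = 0
--     counting = None
--     penalty = 0
--     for cell in line:
--         if cell != counting:
--             counting = cell
--             count = 1
--         else:
--             count += 1
--             if count == 5:
--                 penalty += 3
--             elif count > 5:
--                 penalty += 1
--     return penalty
-- ===== SOURCE B (Python) =====
-- def get_line_penalty(line):
--     penalty = 0
--     i = 0
--     n = len(line)
--     while i < n:
--         j = i
--         while j < n and line[j] == line[i]:
--             j += 1
--         run_len = j - i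
--         if run_len >= 5:
--             penalty += run_len - 2
--         i = j
--     return penalty
-- ===== Notes on version B (the rewrite author's own statement) =====
-- stated objective: simpler
-- what changed: Replaces the per-cell count/last-color state machine with a runs decomposition: scan each maximal run of equal cells once and add the closed form run_len - 2 when run_len >= 5 (A's 3 at count 5 plus 1 per extra cell equals L-2).
import Mathlib
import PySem

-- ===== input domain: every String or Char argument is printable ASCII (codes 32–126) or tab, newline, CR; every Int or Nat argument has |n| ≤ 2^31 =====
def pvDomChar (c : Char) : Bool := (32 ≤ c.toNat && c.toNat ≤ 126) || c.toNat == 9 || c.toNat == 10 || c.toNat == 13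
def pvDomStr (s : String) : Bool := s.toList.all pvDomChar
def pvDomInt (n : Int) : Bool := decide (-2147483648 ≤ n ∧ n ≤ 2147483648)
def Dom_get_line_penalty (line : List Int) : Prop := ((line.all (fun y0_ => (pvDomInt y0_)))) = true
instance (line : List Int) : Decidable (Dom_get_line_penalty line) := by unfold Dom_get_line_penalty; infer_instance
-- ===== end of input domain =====

-- B replaces A's per-cell count/last-color state machine by a maximal-runs scan with the
-- closed form (L - 2 when L ≥ 5) per run; objective: simpler. Return values proved equal.

-- ===== PORT A =====
-- loop state: (count, counting, penalty), exactly A's three variables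
def pvStepA (st : Int × Option Int × Int) (cell : Int) : Int × Option Int × Int :=
  if some cell ≠ st.2.1 then (1, some cell, st.2.2)
  else
    let count := st.1 + 1
    if count = 5 then (count, st.2.1, st.2.2 + 3)
    else if count > 5 then (count, st.2.1, st.2.2 + 1)
    else (count, st.2.1, st.2.2)

def get_line_penalty (line : List Int) : Int :=
  (line.foldl pvStepA (0, none, 0)).2.2

-- ===== PORT B =====
-- B's per-run contribution: run_len - 2 when run_len >= 5, else 0
def pvRunPen (L : Int) : Int := if L ≥ 5 then L - 2 else 0

-- the inner while loop of B: length of the maximal leading run, then recurse on the rest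
def pvRuns (line : List Int) : List Int :=
  match line with
  | [] => []
  | x :: xs =>
      ((xs.takeWhile (fun y => y == x)).length + 1 : Int) ::
        pvRuns (xs.dropWhile (fun y => y == x))
termination_by line.length
decreasing_by
  simp only [List.length_cons]
  have := List.length_dropWhile_le (fun y => y == x) xs
  omega

def get_line_penalty_alt (line : List Int) : Int :=
  ((pvRuns line).map pvRunPen).sum

-- ===== PRECONDITION & SPEC =====
def Spec_get_line_penalty (line : List Int) (out : Int) : Prop := out = get_line_penalty_alt line
instance (line : List Int) (out : Int) : Decidable (Spec_get_line_penalty line out) := by unfold Spec_get_line_penalty; infer_instance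

-- ===== CLAIM (what is proved, stated in full; the proofs are below) =====
def Claim_equal_get_line_penalty : Prop := ∀ (line : List Int), Dom_get_line_penalty line → Spec_get_line_penalty line (get_line_penalty line)

-- ===== LEMMAS AND PROOFS =====

lemma pvAlt_cons (x : Int) (xs : List Int) :
    get_line_penalty_alt (x :: xs) =
      pvRunPen ((xs.takeWhile (fun y => y == x)).length + 1)
        + get_line_penalty_alt (xs.dropWhile (fun y => y == x)) := by
  rw [get_line_penalty_alt, pvRuns]
  simp [get_line_penalty_alt]

-- the invariant: mid-run, with count k ≥ 1 on current color c, the remaining fold yields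
-- penalty accumulated so far plus the closed-form delta for the rest of the run, then B on the rest
lemma pvAux (xs : List Int) : ∀ (k : Int) (c p : Int), 1 ≤ k →
    (xs.foldl pvStepA (k, some c, p)).2.2 =
      p + (pvRunPen (k + (xs.takeWhile (fun y => y == c)).length) - pvRunPen k)
        + get_line_penalty_alt (xs.dropWhile (fun y => y == c)) := by
  induction xs with
  | nil =>
      intro k c p hk
      simp [get_line_penalty_alt, pvRuns]
  | cons x xs ih =>
      intro k c p hk
      by_cases hxc : x = c
      · subst hxc
        have hstep : pvStepA (k, some x, p) x =
            (k + 1, some x, p + (pvRunPen (k + 1) - pvRunPen k)) := by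
          simp only [pvStepA, pvRunPen]
          split_ifs <;> simp_all <;> omega
        simp only [List.foldl_cons, hstep]
        rw [ih (k + 1) x (p + (pvRunPen (k + 1) - pvRunPen k)) (by omega)]
        simp only [List.takeWhile_cons, List.dropWhile_cons, beq_self_eq_true, if_true]
        simp only [List.length_cons]
        push_cast
        ring_nf
      · have hstep : pvStepA (k, some c, p) x = (1, some x, p) := by
          simp [pvStepA, hxc]
        simp only [List.foldl_cons, hstep]
        rw [ih 1 x p (by omega)]
        have hbx : (x == c) = false := by simp [hxc]
        rw [List.takeWhile_cons, List.dropWhile_cons, hbx]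
        simp only [Bool.false_eq_true, if_false, List.length_nil, Nat.cast_zero, add_zero]
        rw [pvAlt_cons]
        have h1 : pvRunPen 1 = 0 := by simp [pvRunPen]
        rw [h1]
        ring_nf

theorem pv_main (line : List Int) : get_line_penalty line = get_line_penalty_alt line := by
  cases line with
  | nil => simp [get_line_penalty, get_line_penalty_alt, pvRuns]
  | cons x xs =>
      have hstep : pvStepA (0, none, 0) x = (1, some x, 0) := by simp [pvStepA]
      rw [get_line_penalty]
      simp only [List.foldl_cons, hstep]
      rw [pvAux xs 1 x 0 (by omega)]
      rw [pvAlt_cons]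
      have h1 : pvRunPen 1 = 0 := by simp [pvRunPen]
      rw [h1]
      ring_nf

-- ===== VERDICT (by name: the statement is the Claim_ definition above) =====
theorem get_line_penalty_spec : Claim_equal_get_line_penalty := by
  intro line _
  unfold Spec_get_line_penalty
  exact pv_main line
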